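-- pv_equiv track=rewrite | github.com/mazeworks-security/MSiMBA | Mba.FFI/optimal5/exhaust/enumchains.py | get_adoptees
-- ===== SOURCE A (Python) =====
-- def get_adoptees(t, idx):
--
--     if len(t[idx][1]) >= 2:
--         return []
--
--     inad = set()
--
--     def remove_ancestors(i):
--         if i not in inad:
--             inad.add(i)
--             for j in t[i][0]:
--                 remove_ancestors(j)
--
--     remove_ancestors(idx)
--
--     for k in range(4):
--         for j in t[idx][k & 1]:
--             inad.add(j)
--             for i in t[j][k >> 1]:
--                 inad.add(i)
--
--     return [x for x in range(len(t)) if x not in inad]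
-- ===== SOURCE B (Python) =====
-- def get_adoptees(t, idx):
--
--     if len(t[idx][1]) >= 2:
--         return []
--
--     # breadth-first: mark idx and everything reachable through ancestor lists, level by level
--     inad = {idx}
--     frontier = [idx]
--     while frontier:
--         nxt = []
--         for i in frontier:
--             for j in t[i][0]:
--                 if j not in inad:
--                     inad.add(j)
--                     nxt.append(j)
--         frontier = nxt
--
--     # one merged pass over both child lists of idx instead of the four (k & 1, k >> 1) passes
--     for j in t[idx][0] + t[idx][1]:
--         inad.add(j)
--         inad.update(t[j][0])
--         inad.update(t[j][1])
--
--     return [x for x in range(len(t)) if x not in inad]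
-- ===== Notes on version B (the rewrite author's own statement) =====
-- stated objective: alternative
-- what changed: The recursive remove_ancestors helper is replaced by an iterative level-by-level frontier traversal of the ancestor graph, and the four (k & 1, k >> 1) population passes are merged into a single pass over t[idx][0] + t[idx][1].
-- outside the precondition, e.g. on get_adoptees([([], []), ([5], [])], 0): A returns [1], B returns [1]
import Mathlib
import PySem

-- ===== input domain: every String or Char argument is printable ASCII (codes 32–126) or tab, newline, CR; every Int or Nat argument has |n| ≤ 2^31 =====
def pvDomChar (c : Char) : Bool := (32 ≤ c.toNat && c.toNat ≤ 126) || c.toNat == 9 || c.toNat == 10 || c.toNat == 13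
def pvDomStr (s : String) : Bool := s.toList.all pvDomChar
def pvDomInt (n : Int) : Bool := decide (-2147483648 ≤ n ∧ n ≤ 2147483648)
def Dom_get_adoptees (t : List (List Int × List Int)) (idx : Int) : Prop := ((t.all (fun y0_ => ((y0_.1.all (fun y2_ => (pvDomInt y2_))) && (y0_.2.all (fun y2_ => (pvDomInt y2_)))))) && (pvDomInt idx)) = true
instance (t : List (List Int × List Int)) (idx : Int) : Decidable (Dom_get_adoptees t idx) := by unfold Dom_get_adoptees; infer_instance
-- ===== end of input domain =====

-- B replaces A's recursive ancestor marking by an iterative level-by-level (frontier) traversal and merges the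
-- four (k & 1, k >> 1) population passes into one pass over t[idx][0] + t[idx][1]; objective: alternative (same cost).

-- ===== PORT A =====

-- t[i] as a total lookup (Python raises IndexError out of range; Pre_ keeps every dereferenced index in range)
def pvEnt (t : List (List Int × List Int)) (i : Int) : List Int × List Int :=
  PySem.List.pyGetD t i ([], [])

-- tuple indexing p[b] for b ∈ {0, 1} (exact for the b = k & 1 / b = k >> 1 values that occur, k ∈ range(4))
def pvSel (p : List Int × List Int) (b : Int) : List Int :=
  if b == 0 then p.1 else p.2

-- A's recursive remove_ancestors; the Nat argument is only a recursion-depth guard (never exhausted: see pvRA_main)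
def pvRA (t : List (List Int × List Int)) : Nat → Int → PySem.Set Int → PySem.Set Int
  | 0, _, inad => inad
  | fuel + 1, i, inad =>
    if PySem.Set.contains inad i then inad
    else ((pvEnt t i).1).foldl (fun s j => pvRA t fuel j s) (PySem.Set.add inad i)

def pvFuel (t : List (List Int × List Int)) : Nat :=
  2 + (t.map (fun p => p.1.length)).sum

-- for k in range(4): for j in t[idx][k & 1]: inad.add(j); for i in t[j][k >> 1]: inad.add(i)
-- (k & 1 = k % 2 and k >> 1 = k // 2, exact for the nonnegative k of range(4))
def pvPopA (t : List (List Int × List Int)) (idx : Int) (s : PySem.Set Int) : PySem.Set Int :=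
  (PySem.List.pyRange 0 4 1).foldl (fun s k =>
    (pvSel (pvEnt t idx) (PySem.Int.mod k 2)).foldl (fun s j =>
      (pvSel (pvEnt t j) (PySem.Int.floordiv k 2)).foldl (fun s2 i => PySem.Set.add s2 i)
        (PySem.Set.add s j)) s) s

def get_adoptees (t : List (List Int × List Int)) (idx : Int) : List Int :=
  if 2 ≤ (pvEnt t idx).2.length then []
  else
    let inad := pvPopA t idx (pvRA t (pvFuel t) idx PySem.Set.empty)
    (PySem.List.pyRange 0 (t.length : Int) 1).filter (fun x => !(PySem.Set.contains inad x))

-- ===== PORT B =====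

-- body of the frontier scan: if j not in inad: inad.add(j); nxt.append(j)
def pvMark (q : PySem.Set Int × List Int) (j : Int) : PySem.Set Int × List Int :=
  if PySem.Set.contains q.1 j then q else (PySem.Set.add q.1 j, q.2 ++ [j])

-- one frontier element: for j in t[i][0]: …
def pvStep (t : List (List Int × List Int)) (q : PySem.Set Int × List Int) (i : Int) : PySem.Set Int × List Int :=
  ((pvEnt t i).1).foldl pvMark q

-- while frontier: … ; the Nat argument is only a loop guard (never exhausted: see pvBFS_main)
def pvBFS (t : List (List Int × List Int)) : Nat → PySem.Set Int → List Int → PySem.Set Int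
  | 0, inad, _ => inad
  | fuel + 1, inad, frontier =>
    match frontier with
    | [] => inad
    | _ :: _ =>
      let p := frontier.foldl (pvStep t) (inad, [])
      pvBFS t fuel p.1 p.2

-- for j in t[idx][0] + t[idx][1]: inad.add(j); inad.update(t[j][0]); inad.update(t[j][1])
def pvPopB (t : List (List Int × List Int)) (idx : Int) (s : PySem.Set Int) : PySem.Set Int :=
  ((pvEnt t idx).1 ++ (pvEnt t idx).2).foldl (fun s j =>
    PySem.Set.update (PySem.Set.update (PySem.Set.add s j) (pvEnt t j).1) (pvEnt t j).2) s

def get_adoptees_alt (t : List (List Int × List Int)) (idx : Int) : List Int :=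
  if 2 ≤ (pvEnt t idx).2.length then []
  else
    let inad := pvPopB t idx (pvBFS t (pvFuel t) (PySem.Set.add PySem.Set.empty idx) [idx])
    (PySem.List.pyRange 0 (t.length : Int) 1).filter (fun x => !(PySem.Set.contains inad x))

-- ===== PRECONDITION & SPEC =====
-- Pre_ excludes inputs on which Python A raises IndexError (an out-of-range stored index gets dereferenced); because
-- which stored indices get dereferenced depends on the traversal, Pre_ conservatively requires EVERY index stored in t
-- to be in range (unless the len(t[idx][1]) >= 2 early return fires first), so it also excludes some inputs whose only
-- invalid references are never touched, on which A and B return the same value.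
def Pre_get_adoptees (t : List (List Int × List Int)) (idx : Int) : Prop :=
  PySem.Raise.InRange t.length idx ∧
  (2 ≤ (PySem.List.pyGetD t idx ([], [])).2.length ∨
    ∀ p ∈ t, ∀ v ∈ p.1 ++ p.2, PySem.Raise.InRange t.length v)

instance (t : List (List Int × List Int)) (idx : Int) : Decidable (Pre_get_adoptees t idx) := by
  unfold Pre_get_adoptees; infer_instance

def pvWitness_get_adoptees : (List (List Int × List Int)) × Int := ([([], []), ([0], [1])], 1)

def Spec_get_adoptees (t : List (List Int × List Int)) (idx : Int) (out : List Int) : Prop := out = get_adoptees_alt t idx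
instance (t : List (List Int × List Int)) (idx : Int) (out : List Int) : Decidable (Spec_get_adoptees t idx out) := by unfold Spec_get_adoptees; infer_instance

-- ===== CLAIM (what is proved, stated in full; the proofs are below) =====
def Claim_equal_get_adoptees : Prop := ∀ (t : List (List Int × List Int)) (idx : Int), Dom_get_adoptees t idx → Pre_get_adoptees t idx → Spec_get_adoptees t idx (get_adoptees t idx)

-- ===== LEMMAS AND PROOFS =====

-- x is reachable from root following first components ("ancestors")
inductive pvReach (t : List (List Int × List Int)) (root : Int) : Int → Prop
  | base : pvReach t root root
  | step {u v : Int} : pvReach t root u → v ∈ (pvEnt t u).1 → pvReach t root v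

-- every value a traversal can ever mark lies in this finite candidate set
def pvC (t : List (List Int × List Int)) (idx : Int) : Finset Int :=
  insert idx (t.flatMap (fun p => p.1)).toFinset

theorem pvEnt_child_mem {t : List (List Int × List Int)} {idx u v : Int}
    (h : v ∈ (pvEnt t u).1) : v ∈ pvC t idx := by
  unfold pvC
  rcases hh : PySem.List.pyGet? t u with _ | pr
  · have he : pvEnt t u = ([], []) := by
      simp [pvEnt, PySem.List.pyGetD, hh]
    rw [he] at h; simp at h
  · have he : pvEnt t u = pr := by
      simp [pvEnt, PySem.List.pyGetD, hh]
    have hpr : pr ∈ t := PySem.List.mem_of_pyGet?_eq_some t hh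
    apply Finset.mem_insert_of_mem
    rw [List.mem_toFinset, List.mem_flatMap]
    exact ⟨pr, hpr, by rw [he] at h; exact h⟩


theorem pvC_card_le (t : List (List Int × List Int)) (idx : Int) :
    (pvC t idx).card ≤ 1 + (t.map (fun p => p.1.length)).sum := by
  unfold pvC
  calc (insert idx (t.flatMap (fun p => p.1)).toFinset).card
      ≤ (t.flatMap (fun p => p.1)).toFinset.card + 1 := Finset.card_insert_le _ _
    _ ≤ (t.flatMap (fun p => p.1)).length + 1 := by
        exact Nat.add_le_add_right (t.flatMap (fun p => p.1)).toFinset_card_le 1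
    _ ≤ 1 + (t.map (fun p => p.1.length)).sum := by
        rw [List.length_flatMap]; omega


theorem pv_card_mono (C : Finset Int) {s s' : PySem.Set Int} (h : ∀ x ∈ s, x ∈ s') :
    (C.filter (fun a => a ∉ s')).card ≤ (C.filter (fun a => a ∉ s)).card := by
  apply Finset.card_le_card
  intro a ha
  rw [Finset.mem_filter] at ha ⊢
  exact ⟨ha.1, fun hs => ha.2 (h a hs)⟩


theorem pv_card_lt (C : Finset Int) {s s' : PySem.Set Int} {i : Int}
    (hsub : ∀ x ∈ s, x ∈ s') (hiC : i ∈ C) (his : i ∉ s) (his' : i ∈ s') :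
    (C.filter (fun a => a ∉ s')).card < (C.filter (fun a => a ∉ s)).card := by
  apply Finset.card_lt_card
  rw [Finset.ssubset_iff_subset_ne]
  constructor
  · intro a ha
    rw [Finset.mem_filter] at ha ⊢
    exact ⟨ha.1, fun hs => ha.2 (hsub a hs)⟩
  · intro he
    have hi1 : i ∈ C.filter (fun a => a ∉ s) := Finset.mem_filter.mpr ⟨hiC, his⟩
    rw [← he] at hi1
    exact (Finset.mem_filter.mp hi1).2 his'


theorem pvRA_mono (t : List (List Int × List Int)) :
    ∀ (fuel : Nat) (i : Int) (s : PySem.Set Int), ∀ x ∈ s, x ∈ pvRA t fuel i s := by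
  intro fuel
  induction fuel with
  | zero => intro i s x hx; exact hx
  | succ n ih =>
    intro i s x hx
    simp only [pvRA]
    split
    · exact hx
    · have aux : ∀ (l : List Int) (s0 : PySem.Set Int), ∀ x ∈ s0,
          x ∈ l.foldl (fun s j => pvRA t n j s) s0 := by
        intro l
        induction l with
        | nil => intro s0 x hx; exact hx
        | cons j rest ihl => intro s0 x hx; exact ihl (pvRA t n j s0) x (ih j s0 x hx)
      exact aux _ _ x ((PySem.Set.mem_add s i x).mpr (Or.inl hx))

theorem pvRA_sound (t : List (List Int × List Int)) (root : Int) :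
    ∀ (fuel : Nat) (i : Int) (s : PySem.Set Int),
      (∀ y ∈ s, pvReach t root y) → pvReach t root i →
      ∀ x ∈ pvRA t fuel i s, pvReach t root x := by
  intro fuel
  induction fuel with
  | zero => intro i s hs _ x hx; exact hs x hx
  | succ n ih =>
    intro i s hs hi x hx
    simp only [pvRA] at hx
    split at hx
    · exact hs x hx
    · have aux : ∀ (l : List Int), (∀ j ∈ l, pvReach t root j) → ∀ (s0 : PySem.Set Int),
          (∀ y ∈ s0, pvReach t root y) →
          ∀ x ∈ l.foldl (fun s j => pvRA t n j s) s0, pvReach t root x := by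
        intro l
        induction l with
        | nil => intro _ s0 hs0 x hx; exact hs0 x hx
        | cons j rest ihl =>
          intro hl s0 hs0 x hx
          exact ihl (fun j' hj' => hl j' (List.mem_cons_of_mem j hj')) (pvRA t n j s0)
            (fun y hy => ih j s0 hs0 (hl j (List.mem_cons_self)) y hy) x hx
      apply aux (pvEnt t i).1 (fun j hj => pvReach.step hi hj) (PySem.Set.add s i) _ x hx
      intro y hy
      rcases (PySem.Set.mem_add s i y).mp hy with hy | rfl
      · exact hs y hy
      · exact hi

theorem pvRA_main (t : List (List Int × List Int)) (C : Finset Int)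
    (hchild : ∀ u v : Int, v ∈ (pvEnt t u).1 → v ∈ C) :
    ∀ (fuel : Nat) (i : Int) (s : PySem.Set Int),
      (C.filter (fun a => a ∉ s)).card < fuel → i ∈ C → (∀ y ∈ s, y ∈ C) →
      (i ∈ pvRA t fuel i s ∧ (∀ y ∈ pvRA t fuel i s, y ∈ C) ∧
        ∀ u ∈ pvRA t fuel i s, u ∈ s ∨ ∀ v ∈ (pvEnt t u).1, v ∈ pvRA t fuel i s) := by
  intro fuel
  induction fuel with
  | zero => intro i s hcard; omega
  | succ n ih =>
    intro i s hcard hiC hsC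
    simp only [pvRA]
    split
    · next hc =>
      have his : i ∈ s := (PySem.Set.contains_iff s i).mp hc
      exact ⟨his, hsC, fun u hu => Or.inl hu⟩
    · next hc =>
      have his : i ∉ s := fun hm => hc ((PySem.Set.contains_iff s i).mpr hm)
      have hs1C : ∀ y ∈ PySem.Set.add s i, y ∈ C := by
        intro y hy
        rcases (PySem.Set.mem_add s i y).mp hy with hy | rfl
        · exact hsC y hy
        · exact hiC
      have hcard1 : (C.filter (fun a => a ∉ PySem.Set.add s i)).card < n := by
        have h1 : (C.filter (fun a => a ∉ PySem.Set.add s i)).card <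
            (C.filter (fun a => a ∉ s)).card :=
          pv_card_lt C (fun x hx => (PySem.Set.mem_add s i x).mpr (Or.inl hx)) hiC his
            ((PySem.Set.mem_add s i i).mpr (Or.inr rfl))
        omega
      have aux : ∀ (l : List Int), (∀ j ∈ l, j ∈ C) → ∀ (acc : PySem.Set Int),
          (∀ y ∈ acc, y ∈ C) → (C.filter (fun a => a ∉ acc)).card < n →
          ((∀ x ∈ acc, x ∈ l.foldl (fun s j => pvRA t n j s) acc) ∧
           (∀ j ∈ l, j ∈ l.foldl (fun s j => pvRA t n j s) acc) ∧
           (∀ y ∈ l.foldl (fun s j => pvRA t n j s) acc, y ∈ C) ∧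
           (∀ u ∈ l.foldl (fun s j => pvRA t n j s) acc,
              u ∈ acc ∨ ∀ v ∈ (pvEnt t u).1, v ∈ l.foldl (fun s j => pvRA t n j s) acc)) := by
        intro l
        induction l with
        | nil =>
          intro _ acc haccC _
          exact ⟨fun x hx => hx, by simp, haccC, fun u hu => Or.inl hu⟩
        | cons j rest ihl =>
          intro hjl acc haccC hacccard
          obtain ⟨hjr, hrC, hrcl⟩ := ih j acc hacccard (hjl j List.mem_cons_self) haccC
          have hmono1 : ∀ x ∈ acc, x ∈ pvRA t n j acc := pvRA_mono t n j acc
          have hrcard : (C.filter (fun a => a ∉ pvRA t n j acc)).card < n :=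
            lt_of_le_of_lt (pv_card_mono C hmono1) hacccard
          obtain ⟨hm2, hall2, hC2, hcl2⟩ :=
            ihl (fun j' hj' => hjl j' (List.mem_cons_of_mem j hj')) (pvRA t n j acc) hrC hrcard
          simp only [List.foldl_cons]
          refine ⟨fun x hx => hm2 x (hmono1 x hx), ?_, hC2, ?_⟩
          · intro j' hj'
            rcases List.mem_cons.mp hj' with rfl | hj'
            · exact hm2 j' hjr
            · exact hall2 j' hj'
          · intro u hu
            rcases hcl2 u hu with h | h
            · rcases hrcl u h with h' | h'
              · exact Or.inl h'
              · exact Or.inr (fun v hv => hm2 v (h' v hv))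
            · exact Or.inr h
      obtain ⟨hm, hall, hCout, hclosed⟩ :=
        aux (pvEnt t i).1 (fun j hj => hchild i j hj) (PySem.Set.add s i) hs1C hcard1
      refine ⟨hm i ((PySem.Set.mem_add s i i).mpr (Or.inr rfl)), hCout, ?_⟩
      intro u hu
      rcases hclosed u hu with h | h
      · rcases (PySem.Set.mem_add s i u).mp h with h' | rfl
        · exact Or.inl h'
        · exact Or.inr hall
      · exact Or.inr h

theorem pvRA_iff (t : List (List Int × List Int)) (idx x : Int) :
    x ∈ pvRA t (pvFuel t) idx PySem.Set.empty ↔ pvReach t idx x := by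
  have hchild : ∀ u v : Int, v ∈ (pvEnt t u).1 → v ∈ pvC t idx :=
    fun u v hv => pvEnt_child_mem hv
  have hcard : ((pvC t idx).filter (fun a => a ∉ (PySem.Set.empty : PySem.Set Int))).card < pvFuel t := by
    have h1 : ((pvC t idx).filter (fun a => a ∉ (PySem.Set.empty : PySem.Set Int))).card ≤ (pvC t idx).card :=
      Finset.card_filter_le _ _
    have h2 := pvC_card_le t idx
    unfold pvFuel
    omega
  obtain ⟨hroot, _, hclosed⟩ := pvRA_main t (pvC t idx) hchild (pvFuel t) idx PySem.Set.empty
    hcard (Finset.mem_insert_self _ _) (by intro y hy; simp [PySem.Set.empty] at hy)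
  constructor
  · intro hx
    apply pvRA_sound t idx (pvFuel t) idx PySem.Set.empty _ pvReach.base x hx
    intro y hy; simp [PySem.Set.empty] at hy
  · intro hx
    induction hx with
    | base => exact hroot
    | @step u v hu hv ihu =>
      rcases hclosed u ihu with h | h
      · simp [PySem.Set.empty] at h
      · exact h v hv

-- facts about the inner frontier scan
theorem pvMark_mono1 (q : PySem.Set Int × List Int) (j : Int) : ∀ x ∈ q.1, x ∈ (pvMark q j).1 := by
  intro x hx; unfold pvMark; split
  · exact hx
  · exact (PySem.Set.mem_add q.1 j x).mpr (Or.inl hx)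

theorem pvMark_mono2 (q : PySem.Set Int × List Int) (j : Int) : ∀ x ∈ q.2, x ∈ (pvMark q j).2 := by
  intro x hx; unfold pvMark; split
  · exact hx
  · simpa using Or.inl hx

theorem pvMark_self (q : PySem.Set Int × List Int) (j : Int) : j ∈ (pvMark q j).1 := by
  unfold pvMark; split
  · next hc => exact (PySem.Set.contains_iff q.1 j).mp hc
  · exact (PySem.Set.mem_add q.1 j j).mpr (Or.inr rfl)

theorem pvMark_src (q : PySem.Set Int × List Int) (j : Int) :
    ∀ y ∈ (pvMark q j).1, y ∈ q.1 ∨ y = j := by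
  intro y hy; unfold pvMark at hy; split at hy
  · exact Or.inl hy
  · exact (PySem.Set.mem_add q.1 j y).mp hy

theorem pvMark_new (q : PySem.Set Int × List Int) (j : Int) :
    ∀ y ∈ (pvMark q j).2, y ∈ q.2 ∨ (y = j ∧ y ∉ q.1) := by
  intro y hy; unfold pvMark at hy; split at hy
  · exact Or.inl hy
  · next hc =>
    rcases List.mem_append.mp hy with hy | hy
    · exact Or.inl hy
    · have hyj : y = j := List.mem_singleton.mp hy
      subst hyj
      exact Or.inr ⟨rfl, fun hm => hc ((PySem.Set.contains_iff q.1 y).mpr hm)⟩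

theorem pvMark_fold_mono1 : ∀ (l : List Int) (q : PySem.Set Int × List Int), ∀ x ∈ q.1, x ∈ (l.foldl pvMark q).1 := by
  intro l
  induction l with
  | nil => intro q x hx; exact hx
  | cons j rest ih =>
    intro q x hx
    exact ih (pvMark q j) x (pvMark_mono1 q j x hx)
theorem pvMark_fold_all : ∀ (l : List Int) (q : PySem.Set Int × List Int), ∀ j ∈ l, j ∈ (l.foldl pvMark q).1 := by
  intro l
  induction l with
  | nil => intro q j hj; simp at hj
  | cons j0 rest ih =>
    intro q j hj
    rcases List.mem_cons.mp hj with rfl | hj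
    · exact pvMark_fold_mono1 rest (pvMark q j) j (pvMark_self q j)
    · exact ih (pvMark q j0) j hj
theorem pvMark_fold_src : ∀ (l : List Int) (q : PySem.Set Int × List Int), ∀ y ∈ (l.foldl pvMark q).1, y ∈ q.1 ∨ y ∈ l := by
  intro l
  induction l with
  | nil => intro q y hy; exact Or.inl hy
  | cons j rest ih =>
    intro q y hy
    rcases ih (pvMark q j) y hy with hy' | hy'
    · rcases pvMark_src q j y hy' with h | h
      · exact Or.inl h
      · exact Or.inr (by simp [h])
    · exact Or.inr (List.mem_cons_of_mem j hy')
theorem pvMark_fold_new : ∀ (l : List Int) (q : PySem.Set Int × List Int), ∀ y ∈ (l.foldl pvMark q).2, y ∈ q.2 ∨ y ∉ q.1 := by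
  intro l
  induction l with
  | nil => intro q y hy; exact Or.inl hy
  | cons j rest ih =>
    intro q y hy
    rcases ih (pvMark q j) y hy with hy' | hy'
    · rcases pvMark_new q j y hy' with h | h
      · exact Or.inl h
      · exact Or.inr h.2
    · exact Or.inr (fun hc => hy' (pvMark_mono1 q j y hc))
theorem pvMark_fold_sub : ∀ (l : List Int) (q : PySem.Set Int × List Int),
    (∀ y ∈ q.2, y ∈ q.1) → ∀ y ∈ (l.foldl pvMark q).2, y ∈ (l.foldl pvMark q).1 := by
  intro l
  induction l with
  | nil => intro q h y hy; exact h y hy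
  | cons j rest ih =>
    intro q h y hy
    apply ih (pvMark q j) _ y hy
    intro z hz
    rcases pvMark_new q j z hz with h' | h'
    · exact pvMark_mono1 q j z (h z h')
    · rw [h'.1]; exact pvMark_self q j
theorem pvMark_fold_cover (P : Int → Prop) : ∀ (l : List Int) (q : PySem.Set Int × List Int),
    (∀ y ∈ q.1, P y ∨ y ∈ q.2) → ∀ y ∈ (l.foldl pvMark q).1, P y ∨ y ∈ (l.foldl pvMark q).2 := by
  intro l
  induction l with
  | nil => intro q h y hy; exact h y hy
  | cons j rest ih =>
    intro q h y hy
    apply ih (pvMark q j) _ y hy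
    intro z hz
    rcases pvMark_src q j z hz with h' | h'
    · rcases h z h' with hp | hp
      · exact Or.inl hp
      · exact Or.inr (pvMark_mono2 q j z hp)
    · subst h'
      unfold pvMark
      split
      · next hc =>
          rcases h z ((PySem.Set.contains_iff q.1 z).mp hc) with hp | hp
          · exact Or.inl hp
          · exact Or.inr hp
      · exact Or.inr (by simp)

-- the whole frontier pass is one pvMark-fold over the concatenated child lists
theorem pvStep_fold_eq (t : List (List Int × List Int)) :
    ∀ (fr : List Int) (q : PySem.Set Int × List Int),
      fr.foldl (pvStep t) q = (fr.flatMap (fun i => (pvEnt t i).1)).foldl pvMark q := by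
  intro fr
  induction fr with
  | nil => intro q; simp
  | cons i rest ih =>
    intro q
    simp only [List.foldl_cons, List.flatMap_cons, List.foldl_append]
    rw [ih]
    rfl



theorem pvBFS_cons (t : List (List Int × List Int)) (n : Nat) (inad : PySem.Set Int) (i0 : Int) (rest : List Int) :
    pvBFS t (n + 1) inad (i0 :: rest) =
      pvBFS t n (((i0 :: rest).flatMap (fun i => (pvEnt t i).1)).foldl pvMark (inad, [])).1
        (((i0 :: rest).flatMap (fun i => (pvEnt t i).1)).foldl pvMark (inad, [])).2 := by
  simp only [pvBFS]
  rw [pvStep_fold_eq]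

theorem pvBFS_sound (t : List (List Int × List Int)) (root : Int) :
    ∀ (fuel : Nat) (inad : PySem.Set Int) (fr : List Int),
      (∀ y ∈ inad, pvReach t root y) → (∀ i ∈ fr, pvReach t root i) →
      ∀ x ∈ pvBFS t fuel inad fr, pvReach t root x := by
  intro fuel
  induction fuel with
  | zero => intro inad fr hin _ x hx; exact hin x hx
  | succ n ih =>
    intro inad fr hin hfr x hx
    cases fr with
    | nil => exact hin x (by simpa only [pvBFS] using hx)
    | cons i0 rest =>
      rw [pvBFS_cons] at hx
      have hL : ∀ y ∈ (i0 :: rest).flatMap (fun i => (pvEnt t i).1), pvReach t root y := by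
        intro y hy
        obtain ⟨i, hi, hyi⟩ := List.mem_flatMap.mp hy
        exact pvReach.step (hfr i hi) hyi
      have hP1mem : ∀ y ∈ (((i0 :: rest).flatMap (fun i => (pvEnt t i).1)).foldl pvMark (inad, ([] : List Int))).1, pvReach t root y := by
        intro y hy
        rcases pvMark_fold_src _ _ y hy with h | h
        · exact hin y h
        · exact hL y h
      have hP2sub := pvMark_fold_sub ((i0 :: rest).flatMap (fun i => (pvEnt t i).1)) (inad, ([] : List Int)) (by simp)
      exact ih _ _ hP1mem (fun i hi => hP1mem i (hP2sub i hi)) x hx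

theorem pvBFS_main (t : List (List Int × List Int)) (C : Finset Int)
    (hchild : ∀ u v : Int, v ∈ (pvEnt t u).1 → v ∈ C) :
    ∀ (fuel : Nat) (inad : PySem.Set Int) (fr : List Int),
      (∀ i ∈ fr, i ∈ inad) → (∀ y ∈ inad, y ∈ C) →
      (∀ u ∈ inad, u ∈ fr ∨ ∀ v ∈ (pvEnt t u).1, v ∈ inad) →
      (fr ≠ [] → (C.filter (fun a => a ∉ inad)).card + 1 < fuel) →
      ((∀ x ∈ inad, x ∈ pvBFS t fuel inad fr) ∧ (∀ y ∈ pvBFS t fuel inad fr, y ∈ C) ∧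
        ∀ u ∈ pvBFS t fuel inad fr, ∀ v ∈ (pvEnt t u).1, v ∈ pvBFS t fuel inad fr) := by
  intro fuel
  induction fuel with
  | zero =>
    intro inad fr hf hC hcl hfuel
    cases fr with
    | nil =>
      refine ⟨fun x hx => hx, hC, ?_⟩
      intro u hu v hv
      rcases hcl u hu with h | h
      · simp at h
      · exact h v hv
    | cons a l => exact absurd (hfuel (by simp)) (by omega)
  | succ n ih =>
    intro inad fr hf hC hcl hfuel
    cases fr with
    | nil =>
      simp only [pvBFS]
      refine ⟨fun x hx => hx, hC, ?_⟩
      intro u hu v hv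
      rcases hcl u hu with h | h
      · simp at h
      · exact h v hv
    | cons i0 rest =>
      rw [pvBFS_cons]
      have hLC : ∀ j ∈ (i0 :: rest).flatMap (fun i => (pvEnt t i).1), j ∈ C := by
        intro j hj
        obtain ⟨i, _, hji⟩ := List.mem_flatMap.mp hj
        exact hchild i j hji
      have hP1 : ∀ x ∈ inad, x ∈ (((i0 :: rest).flatMap (fun i => (pvEnt t i).1)).foldl pvMark (inad, ([] : List Int))).1 :=
        pvMark_fold_mono1 ((i0 :: rest).flatMap (fun i => (pvEnt t i).1)) (inad, ([] : List Int))
      have hP3 := pvMark_fold_all ((i0 :: rest).flatMap (fun i => (pvEnt t i).1)) (inad, ([] : List Int))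
      have hP4 := pvMark_fold_src ((i0 :: rest).flatMap (fun i => (pvEnt t i).1)) (inad, ([] : List Int))
      have hP5 : ∀ y ∈ (((i0 :: rest).flatMap (fun i => (pvEnt t i).1)).foldl pvMark (inad, ([] : List Int))).2, y ∉ inad := by
        intro y hy
        have := pvMark_fold_new ((i0 :: rest).flatMap (fun i => (pvEnt t i).1)) (inad, ([] : List Int)) y hy
        simpa using this
      have hP6 := pvMark_fold_sub ((i0 :: rest).flatMap (fun i => (pvEnt t i).1)) (inad, ([] : List Int)) (by simp)
      have hP7 := pvMark_fold_cover (fun y => y ∈ inad) ((i0 :: rest).flatMap (fun i => (pvEnt t i).1)) (inad, ([] : List Int)) (fun y hy => Or.inl hy)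
      have hC' : ∀ y ∈ (((i0 :: rest).flatMap (fun i => (pvEnt t i).1)).foldl pvMark (inad, ([] : List Int))).1, y ∈ C :=
        fun y hy => (hP4 y hy).elim (hC y) (hLC y)
      have hcl' : ∀ u ∈ (((i0 :: rest).flatMap (fun i => (pvEnt t i).1)).foldl pvMark (inad, ([] : List Int))).1,
          u ∈ (((i0 :: rest).flatMap (fun i => (pvEnt t i).1)).foldl pvMark (inad, ([] : List Int))).2 ∨
          ∀ v ∈ (pvEnt t u).1, v ∈ (((i0 :: rest).flatMap (fun i => (pvEnt t i).1)).foldl pvMark (inad, ([] : List Int))).1 := by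
        intro u hu
        rcases hP7 u hu with hu' | hu'
        · rcases hcl u hu' with h | h
          · exact Or.inr (fun v hv => hP3 v (List.mem_flatMap.mpr ⟨u, h, hv⟩))
          · exact Or.inr (fun v hv => hP1 v (h v hv))
        · exact Or.inl hu'
      have hfuel' : (((i0 :: rest).flatMap (fun i => (pvEnt t i).1)).foldl pvMark (inad, ([] : List Int))).2 ≠ [] →
          (C.filter (fun a => a ∉ (((i0 :: rest).flatMap (fun i => (pvEnt t i).1)).foldl pvMark (inad, ([] : List Int))).1)).card + 1 < n := by
        intro hne
        obtain ⟨y0, hy0⟩ := List.exists_mem_of_ne_nil _ hne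
        have h1 := pv_card_lt C hP1 (hC' y0 (hP6 y0 hy0)) (hP5 y0 hy0) (hP6 y0 hy0)
        have h2 := hfuel (by simp)
        omega
      obtain ⟨ha, hb, hc2⟩ := ih _ _ hP6 hC' hcl' hfuel'
      exact ⟨fun x hx => ha x (hP1 x hx), hb, hc2⟩

theorem pvBFS_iff (t : List (List Int × List Int)) (idx x : Int) :
    x ∈ pvBFS t (pvFuel t) (PySem.Set.add PySem.Set.empty idx) [idx] ↔ pvReach t idx x := by
  have h0 : PySem.Set.add PySem.Set.empty idx = [idx] := rfl
  have hchild : ∀ u v : Int, v ∈ (pvEnt t u).1 → v ∈ pvC t idx :=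
    fun u v hv => pvEnt_child_mem hv
  have hfuel : ([idx] : List Int) ≠ [] →
      ((pvC t idx).filter (fun a => a ∉ ([idx] : List Int))).card + 1 < pvFuel t := by
    intro _
    have hsub : (pvC t idx).filter (fun a => a ∉ ([idx] : List Int)) ⊆ (pvC t idx).erase idx := by
      intro a ha
      rw [Finset.mem_filter] at ha
      exact Finset.mem_erase.mpr ⟨by simpa using ha.2, ha.1⟩
    have h1 : ((pvC t idx).filter (fun a => a ∉ ([idx] : List Int))).card ≤ ((pvC t idx).erase idx).card :=
      Finset.card_le_card hsub
    have hmemC : idx ∈ pvC t idx := Finset.mem_insert_self _ _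
    rw [Finset.card_erase_of_mem hmemC] at h1
    have h2 := pvC_card_le t idx
    have h3 : 1 ≤ (pvC t idx).card := Finset.card_pos.mpr ⟨idx, Finset.mem_insert_self _ _⟩
    unfold pvFuel
    omega
  obtain ⟨hmem, _, hclosed⟩ := pvBFS_main t (pvC t idx) hchild (pvFuel t) [idx] [idx]
    (fun i hi => hi) (by intro y hy; rw [List.mem_singleton] at hy; subst hy; exact Finset.mem_insert_self _ _)
    (fun u hu => Or.inl hu) hfuel
  rw [h0]
  constructor
  · intro hx
    apply pvBFS_sound t idx (pvFuel t) [idx] [idx] _ _ x hx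
    · intro y hy; rw [List.mem_singleton] at hy; subst hy; exact pvReach.base
    · intro y hy; rw [List.mem_singleton] at hy; subst hy; exact pvReach.base
  · intro hx
    induction hx with
    | base => exact hmem idx (List.mem_singleton.mpr rfl)
    | @step u v hu hv ihu => exact hclosed u ihu v hv

theorem pv_mem_pop_layer (sel : Int → List Int) :
    ∀ (L : List Int) (s : PySem.Set Int) (x : Int),
      x ∈ L.foldl (fun s j => (sel j).foldl (fun s2 i => PySem.Set.add s2 i) (PySem.Set.add s j)) s ↔
        x ∈ s ∨ ∃ j ∈ L, x = j ∨ x ∈ sel j := by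
  intro L
  induction L with
  | nil => intro s x; simp
  | cons j rest ih =>
    intro s x
    simp only [List.foldl_cons]
    rw [ih]
    have hinner : ∀ (s0 : PySem.Set Int),
        x ∈ (sel j).foldl (fun s2 i => PySem.Set.add s2 i) s0 ↔ x ∈ s0 ∨ x ∈ sel j := by
      intro s0
      rw [show (fun (s2 : PySem.Set Int) (i : Int) => PySem.Set.add s2 i) =
            (fun (s2 : PySem.Set Int) (i : Int) => PySem.Set.add s2 (id i)) from rfl]
      rw [PySem.Set.mem_foldl_add]
      simp
    rw [hinner, PySem.Set.mem_add]
    simp only [List.mem_cons]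
    constructor
    · rintro (((hx | hx) | hx) | ⟨j', hj', hx⟩)
      · exact Or.inl hx
      · exact Or.inr ⟨j, Or.inl rfl, Or.inl hx⟩
      · exact Or.inr ⟨j, Or.inl rfl, Or.inr hx⟩
      · exact Or.inr ⟨j', Or.inr hj', hx⟩
    · rintro (hx | ⟨j', (rfl | hj'), hx⟩)
      · exact Or.inl (Or.inl (Or.inl hx))
      · rcases hx with rfl | hx
        · exact Or.inl (Or.inl (Or.inr rfl))
        · exact Or.inl (Or.inr hx)
      · exact Or.inr ⟨j', hj', hx⟩


theorem pv_mem_popA (t : List (List Int × List Int)) (idx : Int) (s : PySem.Set Int) (x : Int) :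
    x ∈ pvPopA t idx s ↔ x ∈ s ∨ ∃ j ∈ (pvEnt t idx).1 ++ (pvEnt t idx).2,
      x = j ∨ x ∈ (pvEnt t j).1 ∨ x ∈ (pvEnt t j).2 := by
  unfold pvPopA
  have h4 : PySem.List.pyRange 0 4 1 = [0, 1, 2, 3] := by decide
  rw [h4]
  simp only [List.foldl_cons, List.foldl_nil]
  rw [pv_mem_pop_layer, pv_mem_pop_layer, pv_mem_pop_layer, pv_mem_pop_layer]
  have e0 : PySem.Int.mod (0 : Int) 2 = 0 := by decide
  have e1 : PySem.Int.mod (1 : Int) 2 = 1 := by decide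
  have e2 : PySem.Int.mod (2 : Int) 2 = 0 := by decide
  have e3 : PySem.Int.mod (3 : Int) 2 = 1 := by decide
  have f0 : PySem.Int.floordiv (0 : Int) 2 = 0 := by decide
  have f1 : PySem.Int.floordiv (1 : Int) 2 = 0 := by decide
  have f2 : PySem.Int.floordiv (2 : Int) 2 = 1 := by decide
  have f3 : PySem.Int.floordiv (3 : Int) 2 = 1 := by decide
  rw [e0, e1, e2, e3, f0, f1, f2, f3]
  have s0 : ∀ p : List Int × List Int, pvSel p 0 = p.1 := by intro p; simp [pvSel]
  have s1 : ∀ p : List Int × List Int, pvSel p 1 = p.2 := by intro p; simp [pvSel]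
  simp only [s0, s1, List.mem_append]
  constructor
  · rintro ((((hx | ⟨j, hj, hx⟩) | ⟨j, hj, hx⟩) | ⟨j, hj, hx⟩) | ⟨j, hj, hx⟩)
    · exact Or.inl hx
    · exact Or.inr ⟨j, Or.inl hj, hx.imp id Or.inl⟩
    · exact Or.inr ⟨j, Or.inr hj, hx.imp id Or.inl⟩
    · exact Or.inr ⟨j, Or.inl hj, hx.imp id Or.inr⟩
    · exact Or.inr ⟨j, Or.inr hj, hx.imp id Or.inr⟩
  · rintro (hx | ⟨j, hj, hx⟩)
    · exact Or.inl (Or.inl (Or.inl (Or.inl hx)))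
    · rcases hj with hj | hj
      · rcases hx with rfl | hx | hx
        · exact Or.inl (Or.inl (Or.inl (Or.inr ⟨x, hj, Or.inl rfl⟩)))
        · exact Or.inl (Or.inl (Or.inl (Or.inr ⟨j, hj, Or.inr hx⟩)))
        · exact Or.inl (Or.inr ⟨j, hj, Or.inr hx⟩)
      · rcases hx with rfl | hx | hx
        · exact Or.inl (Or.inl (Or.inr ⟨x, hj, Or.inl rfl⟩))
        · exact Or.inl (Or.inl (Or.inr ⟨j, hj, Or.inr hx⟩))
        · exact Or.inr ⟨j, hj, Or.inr hx⟩

theorem pv_mem_popB (t : List (List Int × List Int)) (idx : Int) (s : PySem.Set Int) (x : Int) :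
    x ∈ pvPopB t idx s ↔ x ∈ s ∨ ∃ j ∈ (pvEnt t idx).1 ++ (pvEnt t idx).2,
      x = j ∨ x ∈ (pvEnt t j).1 ∨ x ∈ (pvEnt t j).2 := by
  unfold pvPopB
  generalize (pvEnt t idx).1 ++ (pvEnt t idx).2 = L
  induction L generalizing s with
  | nil => simp
  | cons j rest ih =>
    simp only [List.foldl_cons]
    rw [ih]
    simp only [PySem.Set.mem_update, PySem.Set.mem_add, List.mem_cons]
    constructor
    · rintro (hx | ⟨j', hj', hx⟩)
      · rcases hx with ((hx | hx) | hx) | hx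
        · exact Or.inl hx
        · exact Or.inr ⟨j, Or.inl rfl, Or.inl hx⟩
        · exact Or.inr ⟨j, Or.inl rfl, Or.inr (Or.inl hx)⟩
        · exact Or.inr ⟨j, Or.inl rfl, Or.inr (Or.inr hx)⟩
      · exact Or.inr ⟨j', Or.inr hj', hx⟩
    · rintro (hx | ⟨j', hj', hx⟩)
      · exact Or.inl (Or.inl (Or.inl (Or.inl hx)))
      · rcases hj' with rfl | hj'
        · rcases hx with rfl | hx | hx
          · exact Or.inl (Or.inl (Or.inl (Or.inr rfl)))
          · exact Or.inl (Or.inl (Or.inr hx))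
          · exact Or.inl (Or.inr hx)
        · exact Or.inr ⟨j', hj', hx⟩

theorem pv_contains_congr {s1 s2 : PySem.Set Int} (h : ∀ x, x ∈ s1 ↔ x ∈ s2) (x : Int) :
    PySem.Set.contains s1 x = PySem.Set.contains s2 x := by
  rw [Bool.eq_iff_iff]
  constructor
  · intro hc; exact (PySem.Set.contains_iff s2 x).mpr ((h x).mp ((PySem.Set.contains_iff s1 x).mp hc))
  · intro hc; exact (PySem.Set.contains_iff s1 x).mpr ((h x).mpr ((PySem.Set.contains_iff s2 x).mp hc))


-- ===== VERDICT (by name: the statement is the Claim_ definition above) =====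
theorem get_adoptees_spec : Claim_equal_get_adoptees := by
  intro t idx _ _
  unfold Spec_get_adoptees get_adoptees get_adoptees_alt
  by_cases hg : 2 ≤ (pvEnt t idx).2.length
  · simp [hg]
  · simp only [hg, if_false]
    apply List.filter_congr
    intro x _
    congr 1
    apply pv_contains_congr
    intro y
    rw [pv_mem_popA, pv_mem_popB, pvRA_iff, pvBFS_iff]
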